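-- pv_equiv track=rewrite | github.com/minhthe/minhthe.007-gmail.com | Sorting/drone-pramp.py | calc_drone_min_energy
-- ===== SOURCE A (Python) =====
-- def calc_drone_min_energy(route):
--   z = []
--   for item in route:
--     z.append(item[2])
--
--   rst = int(1e9)
--
--   first_v = 0
--   for i in range(0, len(z) -1 ): # 1 2 3 4 5 6
--     tmp = z[i+1] - z[i]
--     if tmp < 0 :  # go down
--       first_v += tmp*(-1)
--     else:  # go up
--       first_v += tmp*(-1)
--     if first_v < 0 :
--       rst = min(rst, first_v)
--   if rst < 0 : return rst*(-1)
--   return 0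
-- ===== SOURCE B (Python) =====
-- def calc_drone_min_energy(route):
--   z = [item[2] for item in route]
--   if len(z) < 2:
--     return 0
--   return max(0, max(z[1:]) - z[0])
-- ===== Notes on version B (the rewrite author's own statement) =====
-- stated objective: simpler
-- what changed: Replaced the signed step-difference accumulation with a running minimum by a direct closed form: the answer is max(0, max(z[1:]) - z[0]), computed from the peak altitude of the tail in one expression.
import Mathlib
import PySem

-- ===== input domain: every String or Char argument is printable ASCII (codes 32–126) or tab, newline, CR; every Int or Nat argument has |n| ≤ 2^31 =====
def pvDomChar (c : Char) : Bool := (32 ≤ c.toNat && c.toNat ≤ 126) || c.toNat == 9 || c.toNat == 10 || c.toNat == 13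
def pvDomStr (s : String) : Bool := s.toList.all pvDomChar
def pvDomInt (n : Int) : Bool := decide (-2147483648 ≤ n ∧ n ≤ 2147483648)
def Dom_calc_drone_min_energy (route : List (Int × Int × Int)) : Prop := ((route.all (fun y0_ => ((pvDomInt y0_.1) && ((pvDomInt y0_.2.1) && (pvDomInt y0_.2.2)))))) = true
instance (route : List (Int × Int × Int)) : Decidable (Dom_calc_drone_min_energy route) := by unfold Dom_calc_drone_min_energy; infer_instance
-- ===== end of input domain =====

-- B replaces A's signed step-difference accumulation and running minimum by the closed form
-- max(0, max(z[1:]) - z[0]) (objective: simpler).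


-- ===== PORT A =====
def calc_drone_min_energy (route : List (Int × Int × Int)) : Int :=
  let z : List Int := route.foldl (fun acc item => acc ++ [item.2.2]) []
  let s : Int × Int :=            -- (rst, first_v)
    (PySem.List.pyRange 0 (PySem.List.len z - 1) 1).foldl
      (fun (s : Int × Int) (i : Int) =>
        let tmp := PySem.List.pyGetD z (i + 1) 0 - PySem.List.pyGetD z i 0
        let first_v := if tmp < 0 then s.2 + tmp * (-1) else s.2 + tmp * (-1)
        let rst := if first_v < 0 then min s.1 first_v else s.1
        (rst, first_v))
      (1000000000, 0)
  if s.1 < 0 then s.1 * (-1) else 0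

-- ===== PORT B =====
def calc_drone_min_energy_alt (route : List (Int × Int × Int)) : Int :=
  let z : List Int := route.map (fun item => item.2.2)
  match z with
  | [] => 0
  | [_] => 0
  | z0 :: z1 :: rest => max 0 (rest.foldl max z1 - z0)   -- max(z[1:]) - z[0]

-- ===== PRECONDITION & SPEC =====
def Spec_calc_drone_min_energy (route : List (Int × Int × Int)) (out : Int) : Prop := out = calc_drone_min_energy_alt route
instance (route : List (Int × Int × Int)) (out : Int) : Decidable (Spec_calc_drone_min_energy route out) := by unfold Spec_calc_drone_min_energy; infer_instance

-- ===== CLAIM (what is proved, stated in full; the proofs are below) =====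
def Claim_equal_calc_drone_min_energy : Prop := ∀ (route : List (Int × Int × Int)), Dom_calc_drone_min_energy route → Spec_calc_drone_min_energy route (calc_drone_min_energy route)

-- ===== LEMMAS AND PROOFS =====

-- the body of A's loop as a function of the altitude difference
def pvStep (s : Int × Int) (tmp : Int) : Int × Int :=
  let first_v := if tmp < 0 then s.2 + tmp * (-1) else s.2 + tmp * (-1)
  (if first_v < 0 then min s.1 first_v else s.1, first_v)

-- A's index loop, rephrased structurally: walk the tail carrying the previous altitude
def pvLoopA (s : Int × Int) (prev : Int) : List Int → Int × Int
  | [] => s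
  | y :: ys => pvLoopA (pvStep s (y - prev)) y ys

lemma pvFoldl_max_max (l : List Int) : ∀ a b : Int, l.foldl max (max a b) = max (l.foldl max a) b := by
  induction l with
  | nil => intro a b; rfl
  | cons x xs ih =>
    intro a b
    simp only [List.foldl_cons]
    rw [show max (max a b) x = max (max a x) b by omega, ih]

-- A's loop over Nat indices equals the structural walk
lemma pvNatFold (z : List Int) : ∀ s : Int × Int,
    (List.range (z.length - 1)).foldl
      (fun s k => pvStep s (z.getD (k + 1) 0 - z.getD k 0)) s
    = (match z with | [] => s | p :: ys => pvLoopA s p ys) := by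
  induction z with
  | nil => intro s; rfl
  | cons p ys ih =>
    intro s
    match ys with
    | [] => rfl
    | y :: ys' =>
      simp only [List.length_cons, Nat.add_sub_cancel, List.range_succ_eq_map,
        List.foldl_cons, List.foldl_map]
      have := ih (pvStep s ((p :: y :: ys').getD 1 0 - (p :: y :: ys').getD 0 0))
      simp only [List.length_cons, Nat.add_sub_cancel] at this
      exact this

-- characterisation of the structural walk: the final rst
lemma pvLoopA_char (ys : List Int) : ∀ (c prev r : Int),
    (pvLoopA (r, c - prev) prev ys).1 =
      if c < ys.foldl max c then min r (c - ys.foldl max c) else r := by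
  induction ys with
  | nil =>
    intro c prev r
    simp [pvLoopA]
  | cons y ys ih =>
    intro c prev r
    have hM : ys.foldl max (max c y) = max (ys.foldl max c) y := pvFoldl_max_max ys c y
    have hc : c ≤ ys.foldl max c := (PySem.List.le_foldl_max ys c).1
    show (pvLoopA (pvStep (r, c - prev) (y - prev)) y ys).1 = _
    have hstep : pvStep (r, c - prev) (y - prev)
        = (if c - y < 0 then min r (c - y) else r, c - y) := by
      simp only [pvStep, Prod.mk.injEq]
      refine ⟨?_, ?_⟩ <;> split_ifs <;> omega
    rw [hstep, ih c y _]
    simp only [List.foldl_cons, hM]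
    split_ifs <;> omega

lemma pvIdxFold (z : List Int) :
    (PySem.List.pyRange 0 (PySem.List.len z - 1) 1).foldl
      (fun (s : Int × Int) (i : Int) =>
        let tmp := PySem.List.pyGetD z (i + 1) 0 - PySem.List.pyGetD z i 0
        let first_v := if tmp < 0 then s.2 + tmp * (-1) else s.2 + tmp * (-1)
        (if first_v < 0 then min s.1 first_v else s.1, first_v))
      (1000000000, 0)
    = (match z with | [] => ((1000000000 : Int), (0 : Int)) | p :: ys => pvLoopA (1000000000, 0) p ys) := by
  rw [PySem.List.pyRange_one]
  have hlen : ((PySem.List.len z - 1) - 0).toNat = z.length - 1 := by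
    simp [PySem.List.len_eq]
  rw [hlen, List.foldl_map]
  have hbody :
      (fun (s : Int × Int) (k : Nat) =>
        (fun (s : Int × Int) (i : Int) =>
          let tmp := PySem.List.pyGetD z (i + 1) 0 - PySem.List.pyGetD z i 0
          let first_v := if tmp < 0 then s.2 + tmp * (-1) else s.2 + tmp * (-1)
          (if first_v < 0 then min s.1 first_v else s.1, first_v)) s ((0 : Int) + (k : Int)))
      = (fun (s : Int × Int) (k : Nat) => pvStep s (z.getD (k + 1) 0 - z.getD k 0)) := by
    funext s k
    have h2 : PySem.List.pyGetD z ((k : Int) + 1) 0 = z.getD (k + 1) 0 := by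
      rw [show ((k : Int) + 1) = ((k + 1 : Nat) : Int) by push_cast; ring,
        PySem.List.pyGetD_natCast]
    simp only [pvStep, zero_add, h2, PySem.List.pyGetD_natCast]
  rw [hbody, pvNatFold z (1000000000, 0)]

theorem calc_drone_min_energy_spec_aux (route : List (Int × Int × Int)) :
    calc_drone_min_energy route = calc_drone_min_energy_alt route := by
  have hz : route.foldl (fun acc item => acc ++ [item.2.2]) ([] : List Int)
      = route.map (fun item => item.2.2) := by
    rw [PySem.List.foldl_append_singleton_eq_map]
    exact List.nil_append _
  simp only [calc_drone_min_energy, calc_drone_min_energy_alt]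
  rw [hz]
  generalize route.map (fun item => item.2.2) = z
  rw [pvIdxFold z]
  match z with
  | [] => rfl
  | [_] => rfl
  | z0 :: z1 :: rest =>
    have h0 : (0 : Int) = z0 - z0 := by ring
    show (if (pvLoopA (1000000000, 0) z0 (z1 :: rest)).1 < 0
          then (pvLoopA (1000000000, 0) z0 (z1 :: rest)).1 * (-1) else 0)
        = max 0 (rest.foldl max z1 - z0)
    rw [h0, pvLoopA_char (z1 :: rest) z0 z0 1000000000]
    have hM : (z1 :: rest).foldl max z0 = max (rest.foldl max z1) z0 := by
      simp only [List.foldl_cons]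
      rw [max_comm z0 z1, pvFoldl_max_max rest z1 z0]
    rw [hM]
    have h1 : z1 ≤ rest.foldl max z1 := (PySem.List.le_foldl_max rest z1).1
    split_ifs <;> omega

-- ===== VERDICT (by name: the statement is the Claim_ definition above) =====
theorem calc_drone_min_energy_spec : Claim_equal_calc_drone_min_energy := by
  intro route _
  exact calc_drone_min_energy_spec_aux route
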